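-- pv_equiv track=rewrite | github.com/Hizur/BudLarian-Bot-for-ButCare | strains_utils.py | parse_producer_filters
-- ===== SOURCE A (Python) =====
-- PRODUCER_KEYWORDS = {
--     "Four20 Pharma": ["four20pharma", "four20", "four 20 pharma"],
--     "S-LAB": ["s-lab", "slab"],
--     "Tilray": ["tilray"],
--     "Aurora": ["aurora"],
--     "Canopy Growth": ["canopygrowth", "canopy"],
--     "CanPoland": ["canpoland"],
--     "COSMA": ["cosma"],
--     "Polfarmex": ["polfarmex"],
--     "ODI Pharma": ["odipharma", "odi pharma", "odi"],
--     "Cantourage": ["cantourage"],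
--     "Medezin": ["medezin"],
--     "Spectrum Therapeutics": ["spectrum", "spectrum therapeutics" , "Spectrum Therapeutics"],
-- }
--
-- def parse_producer_filters(args):
--     """
--     Parse command arguments to extract producer filters.
--     Arguments starting with '-' will be treated as producers to exclude.
--
--     Example: ['-tilray', '-slab'] will exclude Tilray and S-LAB producers.
--
--     Returns a list of producer names to exclude.
--     """
--     excluded_producers = []
--
--     for arg in args:
--         if arg.startswith('-'):
--             # Remove the '-' prefix
--             producer_key = arg[1:].lower()
--
--             # Match with known producers
--             for producer_name, keywords in PRODUCER_KEYWORDS.items():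
--                 if producer_key in keywords or producer_key == producer_name.lower().replace(' ', ''):
--                     excluded_producers.append(producer_name)
--                     break
--
--     return excluded_producers
-- ===== SOURCE B (Python) =====
-- PRODUCER_KEYWORDS = {
--     "Four20 Pharma": ["four20pharma", "four20", "four 20 pharma"],
--     "S-LAB": ["s-lab", "slab"],
--     "Tilray": ["tilray"],
--     "Aurora": ["aurora"],
--     "Canopy Growth": ["canopygrowth", "canopy"],
--     "CanPoland": ["canpoland"],
--     "COSMA": ["cosma"],
--     "Polfarmex": ["polfarmex"],
--     "ODI Pharma": ["odipharma", "odi pharma", "odi"],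
--     "Cantourage": ["cantourage"],
--     "Medezin": ["medezin"],
--     "Spectrum Therapeutics": ["spectrum", "spectrum therapeutics" , "Spectrum Therapeutics"],
-- }
--
-- # Inverted index built once: every keyword and every normalized producer name
-- # maps to its producer; setdefault keeps the first producer on any collision.
-- KEYWORD_TO_PRODUCER = {}
-- for _name, _keywords in PRODUCER_KEYWORDS.items():
--     for _kw in _keywords:
--         KEYWORD_TO_PRODUCER.setdefault(_kw, _name)
--     KEYWORD_TO_PRODUCER.setdefault(_name.lower().replace(' ', ''), _name)
--
--
-- def parse_producer_filters(args):
--     excluded_producers = []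
--     for arg in args:
--         if arg.startswith('-'):
--             producer = KEYWORD_TO_PRODUCER.get(arg[1:].lower())
--             if producer is not None:
--                 excluded_producers.append(producer)
--     return excluded_producers
-- ===== Notes on version B (the rewrite author's own statement) =====
-- stated objective: idiomatic
-- what changed: B builds an inverted keyword-to-producer dict once at module level (setdefault, so the first producer wins as A's break does) and replaces A's inner scan over PRODUCER_KEYWORDS with a single dict lookup per argument.
import Mathlib
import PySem

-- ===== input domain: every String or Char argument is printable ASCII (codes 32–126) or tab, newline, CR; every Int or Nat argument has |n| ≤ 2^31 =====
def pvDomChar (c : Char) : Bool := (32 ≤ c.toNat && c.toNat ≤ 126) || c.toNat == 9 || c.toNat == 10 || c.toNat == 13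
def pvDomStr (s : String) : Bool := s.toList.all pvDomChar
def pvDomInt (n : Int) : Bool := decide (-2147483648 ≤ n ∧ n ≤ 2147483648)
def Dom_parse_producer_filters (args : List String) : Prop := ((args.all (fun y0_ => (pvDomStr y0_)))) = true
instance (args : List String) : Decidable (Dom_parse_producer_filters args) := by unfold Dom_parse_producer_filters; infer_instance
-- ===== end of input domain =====

-- B replaces the inner scan over PRODUCER_KEYWORDS by a single lookup in an inverted
-- keyword→producer dict built once (idiomatic; first producer wins via setdefault).

-- ===== PORT A =====
def producerKeywords : List (String × List String) := [
  ("Four20 Pharma", ["four20pharma", "four20", "four 20 pharma"]),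
  ("S-LAB", ["s-lab", "slab"]),
  ("Tilray", ["tilray"]),
  ("Aurora", ["aurora"]),
  ("Canopy Growth", ["canopygrowth", "canopy"]),
  ("CanPoland", ["canpoland"]),
  ("COSMA", ["cosma"]),
  ("Polfarmex", ["polfarmex"]),
  ("ODI Pharma", ["odipharma", "odi pharma", "odi"]),
  ("Cantourage", ["cantourage"]),
  ("Medezin", ["medezin"]),
  ("Spectrum Therapeutics", ["spectrum", "spectrum therapeutics", "Spectrum Therapeutics"])]

-- normalized producer name: producer_name.lower().replace(' ', '')
def normName (name : String) : String := PySem.Str.replace (PySem.Str.lower name) " " ""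

-- the inner 'for producer_name, keywords in PRODUCER_KEYWORDS.items(): … break'
def matchProducer (key : String) : List (String × List String) → Option String
  | [] => none
  | (name, kws) :: rest =>
      if kws.contains key || key == normName name then some name
      else matchProducer key rest

def parse_producer_filters (args : List String) : List String :=
  args.foldl (fun acc arg =>
    if PySem.Str.startswith arg "-" then
      let producer_key := PySem.Str.lower (PySem.Str.slice arg (some 1) none)
      match matchProducer producer_key producerKeywords with
      | some name => acc ++ [name]
      | none => acc
    else acc) []

-- ===== PORT B =====
-- module-level build of KEYWORD_TO_PRODUCER via setdefault (first producer wins)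
def keywordToProducer : PySem.Dict String String :=
  producerKeywords.foldl (fun d p =>
    ((p.2.foldl (fun d kw => d.setdefault kw p.1) d)).setdefault (normName p.1) p.1)
    PySem.Dict.empty

def parse_producer_filters_alt (args : List String) : List String :=
  args.foldl (fun acc arg =>
    if PySem.Str.startswith arg "-" then
      match keywordToProducer.get? (PySem.Str.lower (PySem.Str.slice arg (some 1) none)) with
      | some producer => acc ++ [producer]
      | none => acc
    else acc) []

-- ===== PRECONDITION & SPEC =====
def Spec_parse_producer_filters (args : List String) (out : List String) : Prop := out = parse_producer_filters_alt args
instance (args : List String) (out : List String) : Decidable (Spec_parse_producer_filters args out) := by unfold Spec_parse_producer_filters; infer_instance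

-- ===== CLAIM (what is proved, stated in full; the proofs are below) =====
def Claim_equal_parse_producer_filters : Prop := ∀ (args : List String), Dom_parse_producer_filters args → Spec_parse_producer_filters args (parse_producer_filters args)

-- ===== LEMMAS AND PROOFS =====

-- the keyword fold: setdefault keeps earlier entries, appends 'name' for new keyword keys
theorem get?_foldl_setdefault_kws (k name : String) (kws : List String) (d : PySem.Dict String String) :
    (kws.foldl (fun d kw => d.setdefault kw name) d).get? k =
      (d.get? k).or (if kws.contains k then some name else none) := by
  induction kws generalizing d with
  | nil => simp
  | cons kw kws ih =>
    simp only [List.foldl_cons, ih]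
    by_cases hk : k = kw
    · subst hk
      rw [PySem.Dict.get?_setdefault_self]
      cases hd : d.get? k <;> simp
    · rw [PySem.Dict.get?_setdefault_of_ne _ _ hk]
      simp [hk]

-- the whole build: looking up the inverted dict is A's first-match scan
theorem get?_build (k : String) (tbl : List (String × List String)) (d : PySem.Dict String String) :
    (tbl.foldl (fun d p =>
        ((p.2.foldl (fun d kw => d.setdefault kw p.1) d)).setdefault (normName p.1) p.1) d).get? k =
      (d.get? k).or (matchProducer k tbl) := by
  induction tbl generalizing d with
  | nil => simp [matchProducer]
  | cons p tbl ih =>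
    simp only [List.foldl_cons, ih, matchProducer]
    by_cases hn : k = normName p.1
    · subst hn
      rw [PySem.Dict.get?_setdefault_self, get?_foldl_setdefault_kws]
      by_cases hc : normName p.1 ∈ p.2 <;>
        cases hd : d.get? (normName p.1) <;> simp [hc]
    · rw [PySem.Dict.get?_setdefault_of_ne _ _ hn, get?_foldl_setdefault_kws]
      by_cases hc : k ∈ p.2 <;> cases hd : d.get? k <;> simp [hc, hn]

set_option maxHeartbeats 1000000 in
theorem keywordToProducer_get? (k : String) :
    keywordToProducer.get? k = matchProducer k producerKeywords := by
  unfold keywordToProducer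
  rw [get?_build]
  rw [PySem.Dict.get?_empty, Option.none_or]

-- ===== VERDICT (by name: the statement is the Claim_ definition above) =====
theorem parse_producer_filters_spec : Claim_equal_parse_producer_filters := by
  intro args _
  unfold Spec_parse_producer_filters parse_producer_filters parse_producer_filters_alt
  refine List.foldl_ext _ _ _ (fun acc arg _ => ?_)
  simp only [keywordToProducer_get?]
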